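-- pv_equiv track=rewrite | github.com/Renaxis-Math/Car-Price-Prediction | Confidential/Recruiting/Companies/Akuna/QR/phone/count_zero_digits.py | solve_1_n
-- ===== SOURCE A (Python) =====
-- def count_single_number(num):
--     answer = 0
--     while num > 0:
--         answer += (num % 10 == 0)
--         num //=10
--     return answer
--
-- def solve_1_n(n):
--     if n == 0: return 0
--     if n <= 10: return 1
--
--     next_num = n // 10
--     remainder = n % 10
--
--     answer = next_num + 10 * (solve_1_n(next_num) - 1) # -1 for 0, next_num ~ 10, 100, 1000
--     if remainder > 0:
--         answer += remainder * count_single_number(next_num) + 1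
--     return answer
-- ===== SOURCE B (Python) =====
-- def solve_1_n(n):
--     # Counts zero digits written in str(i) for i in range(n), i.e. for 0..n-1.
--     if n <= 0:
--         return 0
--     m = n - 1
--     total = 1  # the number 0 itself contributes one zero digit
--     place = 1
--     while place <= m:
--         higher = m // (place * 10)
--         cur = (m // place) % 10
--         lower = m % place
--         if cur == 0:
--             total += (higher - 1) * place + lower + 1
--         else:
--             total += higher * place
--         place *= 10
--     return total
-- ===== Notes on version B (the rewrite author's own statement) =====
-- stated objective: alternative
-- what changed: Replaces A's recursion on the leading digits plus the per-digit helper count_single_number with a single iterative loop over decimal places that adds each position's zero contribution via the higher/cur/lower closed form.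
-- outside the precondition, e.g. on solve_1_n(-5): A returns 1, B returns 0
import Mathlib
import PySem

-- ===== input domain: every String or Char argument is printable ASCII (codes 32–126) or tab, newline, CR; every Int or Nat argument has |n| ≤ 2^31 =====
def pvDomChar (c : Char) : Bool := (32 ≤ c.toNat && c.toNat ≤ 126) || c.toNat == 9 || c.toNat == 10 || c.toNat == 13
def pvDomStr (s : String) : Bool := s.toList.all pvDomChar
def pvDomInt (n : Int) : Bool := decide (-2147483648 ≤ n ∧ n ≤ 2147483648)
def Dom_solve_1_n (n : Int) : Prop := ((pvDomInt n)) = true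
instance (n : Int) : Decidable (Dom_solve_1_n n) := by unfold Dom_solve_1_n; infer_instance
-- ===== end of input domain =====

-- B replaces A's recursion on n // 10 with a single iterative loop over digit places
-- using the higher/cur/lower closed form per place (objective: alternative algorithm).

-- ===== PORT A =====
def count_single_number (num : Int) : Int :=
  if h : 0 < num then
    (if PySem.Int.mod num 10 = 0 then 1 else 0) + count_single_number (PySem.Int.floordiv num 10)
  else 0
termination_by num.toNat
decreasing_by
  rw [PySem.Int.floordiv_eq_ediv_of_pos (by norm_num : (0:Int) < 10)]
  omega

def solve_1_n (n : Int) : Int :=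
  if n = 0 then 0
  else if n ≤ 10 then 1
  else
    let next_num := PySem.Int.floordiv n 10
    let remainder := PySem.Int.mod n 10
    let answer := next_num + 10 * (solve_1_n next_num - 1)
    if 0 < remainder then answer + (remainder * count_single_number next_num + 1) else answer
termination_by n.toNat
decreasing_by
  rw [PySem.Int.floordiv_eq_ediv_of_pos (by norm_num : (0:Int) < 10)]
  omega

-- ===== PORT B =====
-- the while loop of Source B, with fuel (one unit per executed iteration; enough fuel is supplied below)
def bLoop : Nat → Int → Int → Int
  | 0, _, _ => 0
  | fuel+1, m, place =>
    if place ≤ m then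
      let higher := PySem.Int.floordiv m (place * 10)
      let cur := PySem.Int.mod (PySem.Int.floordiv m place) 10
      let lower := PySem.Int.mod m place
      (if cur = 0 then (higher - 1) * place + lower + 1 else higher * place) + bLoop fuel m (place * 10)
    else 0

def solve_1_n_alt (n : Int) : Int :=
  if n ≤ 0 then 0
  else 1 + bLoop ((n - 1).toNat + 1) (n - 1) 1

-- ===== PRECONDITION & SPEC =====
-- Pre_ excludes negative n, which lies outside the function's natural counting domain
-- (count of zero digits written for the naturals below n); B's loop does not run there
-- and counts nothing, while A falls back to its small-input base value.
def Pre_solve_1_n (n : Int) : Prop := 0 ≤ n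
instance (n : Int) : Decidable (Pre_solve_1_n n) := by unfold Pre_solve_1_n; infer_instance
def pvWitness_solve_1_n : Int := 7

def Spec_solve_1_n (n : Int) (out : Int) : Prop := out = solve_1_n_alt n
instance (n : Int) (out : Int) : Decidable (Spec_solve_1_n n out) := by unfold Spec_solve_1_n; infer_instance

-- ===== CLAIM (what is proved, stated in full; the proofs are below) =====
def Claim_equal_solve_1_n : Prop := ∀ (n : Int), Dom_solve_1_n n → Pre_solve_1_n n → Spec_solve_1_n n (solve_1_n n)

-- ===== LEMMAS AND PROOFS =====

-- division characterization used to compute quotients at shifted places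
theorem pv_div_eq (a b q r : Int) (h : 0 < b) (h2 : 0 ≤ r) (h3 : r < b) (h4 : a = b*q + r) :
    a / b = q ∧ a % b = r := by
  have hq : a / b = q := by
    rw [show a = r + b * q by omega, Int.add_mul_ediv_left r q (by omega : b ≠ 0),
      Int.ediv_eq_zero_of_lt h2 h3]
    ring
  refine ⟨hq, ?_⟩
  have h5 := Int.mul_ediv_add_emod a b
  rw [hq] at h5; omega

theorem csn_nonpos (num : Int) (h : num ≤ 0) : count_single_number num = 0 := by
  rw [count_single_number]
  rw [dif_neg (by omega)]

theorem csn_unfold (num : Int) (h : 0 < num) :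
    count_single_number num = (if num % 10 = 0 then 1 else 0) + count_single_number (num / 10) := by
  rw [count_single_number, dif_pos h,
    PySem.Int.floordiv_eq_ediv_of_pos (by norm_num : (0:Int) < 10),
    PySem.Int.mod_eq_emod_of_pos (by norm_num : (0:Int) < 10)]

theorem csn_small (m : Int) (h0 : 0 ≤ m) (h9 : m ≤ 9) : count_single_number m = 0 := by
  rcases eq_or_lt_of_le h0 with h | h
  · exact csn_nonpos m (by omega)
  · rw [csn_unfold m h, show m % 10 = m by omega, show m / 10 = 0 by omega,
      if_neg (by omega), csn_nonpos 0 le_rfl]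
    ring

theorem csn_step (q k : Int) (hq : 1 ≤ q) (hk0 : 0 ≤ k) (hk9 : k ≤ 9) :
    count_single_number (10*q + k) = (if k = 0 then 1 else 0) + count_single_number q := by
  rw [csn_unfold _ (by omega), show (10*q+k) % 10 = k by omega, show (10*q+k) / 10 = q by omega]

-- SZ n = number of zero digits written in str(i) for i = 0, 1, …, n-1 (with SZ counting
-- the digit zeros of each i via count_single_number, which gives 0 for i = 0)
def SZ : Nat → Int
  | 0 => 0
  | n+1 => SZ n + count_single_number (n : Int)

theorem SZ_succ (n : Nat) : SZ (n+1) = SZ n + count_single_number (n : Int) := rfl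

theorem SZ_small (k : Nat) (h : k ≤ 10) : SZ k = 0 := by
  induction k with
  | zero => rfl
  | succ k ih =>
    rw [SZ_succ, ih (by omega), csn_small _ (by positivity) (by exact_mod_cast (by omega : k ≤ 9))]
    ring

theorem SZ_ten_block (q : Nat) (hq : 1 ≤ q) :
    SZ (10*q + 10) = SZ (10*q) + 10 * count_single_number (q : Int) + 1 := by
  have hq' : (1:Int) ≤ (q:Int) := by exact_mod_cast hq
  have e0 : ∀ k : Nat, 1 ≤ k → k ≤ 9 →
      count_single_number ((10*q+k : Nat) : Int) = count_single_number (q : Int) := by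
    intro k h1 h9
    push_cast
    rw [csn_step _ _ hq' (by exact_mod_cast Nat.zero_le k) (by exact_mod_cast h9),
      if_neg (by exact_mod_cast Nat.one_le_iff_ne_zero.mp h1)]
    ring
  have e00 : count_single_number ((10*q : Nat) : Int) = 1 + count_single_number (q : Int) := by
    push_cast
    rw [show ((10:Int)*q) = 10*q + 0 by ring, csn_step _ _ hq' le_rfl (by norm_num), if_pos rfl]
  rw [show 10*q+10 = (10*q+9)+1 by ring, SZ_succ,
      show 10*q+9 = (10*q+8)+1 by ring, SZ_succ,
      show 10*q+8 = (10*q+7)+1 by ring, SZ_succ,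
      show 10*q+7 = (10*q+6)+1 by ring, SZ_succ,
      show 10*q+6 = (10*q+5)+1 by ring, SZ_succ,
      show 10*q+5 = (10*q+4)+1 by ring, SZ_succ,
      show 10*q+4 = (10*q+3)+1 by ring, SZ_succ,
      show 10*q+3 = (10*q+2)+1 by ring, SZ_succ,
      show 10*q+2 = (10*q+1)+1 by ring, SZ_succ,
      show 10*q+1 = (10*q)+1 by ring, SZ_succ,
      e00,
      e0 1 (by omega) (by omega),
      e0 2 (by omega) (by omega),
      e0 3 (by omega) (by omega),
      e0 4 (by omega) (by omega),
      e0 5 (by omega) (by omega),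
      e0 6 (by omega) (by omega),
      e0 7 (by omega) (by omega),
      e0 8 (by omega) (by omega),
      e0 9 (by omega) (by omega),
      ]
  ring

theorem SZ_block (q : Nat) (hq : 1 ≤ q) : SZ (10*q) = 10 * SZ q + (q:Int) - 1 := by
  induction q, hq using Nat.le_induction with
  | base => rw [show 10*1 = 10 by norm_num, SZ_small 10 le_rfl, SZ_small 1 (by omega)]; norm_num
  | succ q hq ih =>
    rw [show 10*(q+1) = 10*q + 10 by ring, SZ_ten_block q hq, ih, SZ_succ]
    push_cast; ring

theorem SZ_part (q d : Nat) (hq : 1 ≤ q) (hd : d ≤ 9) :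
    SZ (10*q + d + 1) = SZ (10*q) + 1 + ((d:Int)+1) * count_single_number (q : Int) := by
  have hq' : (1:Int) ≤ (q:Int) := by exact_mod_cast hq
  induction d with
  | zero =>
    rw [SZ_succ]
    push_cast
    rw [show ((10:Int)*q) = 10*q + 0 by ring, csn_step _ _ hq' le_rfl (by norm_num), if_pos rfl]
    ring
  | succ d ih =>
    rw [show (10*q + (d+1) + 1) = (10*q + d + 1) + 1 by ring, SZ_succ, ih (by omega)]
    have : count_single_number ((10*q + d + 1 : Nat) : Int) = count_single_number (q : Int) := by
      push_cast
      rw [show ((10:Int)*q + d + 1) = 10*q + (d+1) by ring,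
        csn_step _ _ hq' (by positivity) (by exact_mod_cast (by omega : d + 1 ≤ 9)),
        if_neg (by positivity)]
      ring
    rw [this]; push_cast; ring

theorem SZ_recA (q r : Nat) (hq : 1 ≤ q) (hr : r ≤ 9) :
    SZ (10*q + r) = 10 * SZ q + (q:Int) - 1 +
      (if 0 < r then (r:Int) * count_single_number (q:Int) + 1 else 0) := by
  rcases Nat.eq_zero_or_pos r with h | h
  · subst h; rw [if_neg (by omega)]; simpa using SZ_block q hq
  · rw [if_pos h, show 10*q + r = 10*q + (r-1) + 1 by omega, SZ_part q (r-1) hq (by omega),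
      SZ_block q hq]
    have : ((r-1 : Nat) : Int) = (r:Int) - 1 := by omega
    rw [this]; ring

theorem SZ_recB (q d : Nat) (hq : 1 ≤ q) (hd : d ≤ 9) :
    SZ (10*q + d + 1) = (q:Int) + 10 * SZ (q+1) + ((d:Int) - 9) * count_single_number (q:Int) := by
  rw [SZ_part q d hq hd, SZ_block q hq, SZ_succ]
  ring

-- ===== A-side characterization =====
theorem A_char_aux (N : Nat) : ∀ n : Int, 1 ≤ n → n.toNat ≤ N → solve_1_n n = SZ n.toNat + 1 := by
  induction N with
  | zero => intro n h h0; omega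
  | succ N ih =>
    intro n h hN
    rw [solve_1_n]
    by_cases h10 : n ≤ 10
    · rw [if_neg (by omega), if_pos h10, SZ_small n.toNat (by omega)]; ring
    · rw [if_neg (by omega), if_neg h10]
      simp only [PySem.Int.floordiv_eq_ediv_of_pos (by norm_num : (0:Int) < 10),
        PySem.Int.mod_eq_emod_of_pos (by norm_num : (0:Int) < 10)]
      have hq1 : 1 ≤ n / 10 := by omega
      have ihq := ih (n / 10) hq1 (by omega)
      rw [ihq]
      have hsz := SZ_recA (n / 10).toNat (n % 10).toNat (by omega) (by omega)
      have hqc : (((n / 10).toNat : Nat) : Int) = n / 10 := by omega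
      have hrc : (((n % 10).toNat : Nat) : Int) = n % 10 := by omega
      rw [hqc, hrc] at hsz
      have hnt : n.toNat = 10 * (n / 10).toNat + (n % 10).toNat := by omega
      rw [hnt, hsz]
      by_cases hr : 0 < n % 10
      · rw [if_pos hr, if_pos (by omega : 0 < (n % 10).toNat)]; ring
      · rw [if_neg hr, if_neg (by omega : ¬ 0 < (n % 10).toNat)]; ring

-- ===== B-side characterization =====
theorem bLoop_stop (f : Nat) (m p : Int) (h : m < p) : bLoop f m p = 0 := by
  cases f with
  | zero => rfl
  | succ f => rw [bLoop, if_neg (by omega)]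

-- the place-shift recurrence of Source B's loop: the places ≥ 10p of 10q+d contribute ten
-- times what the places ≥ p of q contribute, corrected by (d-9) per zero digit of q at those places
theorem bLoop_shift (f : Nat) : ∀ q d p : Int, 0 ≤ q → 0 ≤ d → d ≤ 9 → 1 ≤ p →
    q < p * 10 ^ f →
    bLoop f (10*q + d) (p*10) =
      10 * bLoop f q p + (d - 9) * count_single_number (q / p) := by
  induction f with
  | zero =>
    intro q d p hq hd0 hd9 hp hlt
    rw [Int.ediv_eq_zero_of_lt hq (by simpa using hlt), csn_nonpos 0 le_rfl]
    simp [bLoop]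
  | succ f ih =>
    intro q d p hq hd0 hd9 hp hlt
    by_cases hpq : p ≤ q
    · -- both loops take a step
      have ha1 : 1 ≤ q / p := (Int.le_ediv_iff_mul_le (by omega)).mpr (by omega)
      set a := q / p with ha
      set rp := q % p with hrp
      have hqe : q = p * a + rp := by
        have h := Int.mul_ediv_add_emod q p
        rw [ha, hrp]; linarith
      have hrp0 : 0 ≤ rp := Int.emod_nonneg q (by omega)
      have hrpl : rp < p := Int.emod_lt_of_pos q (by omega)
      set s := a % 10 with hs
      set a2 := a / 10 with ha2
      have hae : a = 10 * a2 + s := by omega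
      have hs0 : 0 ≤ s := by omega
      have hs9 : s ≤ 9 := by omega
      -- quotients and remainders at the shifted places
      have hd1 : (10*q + d) / (p*10) = a ∧ (10*q + d) % (p*10) = 10*rp + d :=
        pv_div_eq _ _ _ _ (by omega) (by omega) (by omega) (by rw [hqe]; ring)
      have hd2 : (10*q + d) / (p*10*10) = a2 ∧ (10*q + d) % (p*10*10) = 10*p*s + 10*rp + d :=
        pv_div_eq _ _ _ _ (by omega) (by positivity)
          (by nlinarith) (by rw [hqe, hae]; ring)
      have hd3 : q / (p*10) = a2 ∧ q % (p*10) = p*s + rp :=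
        pv_div_eq _ _ _ _ (by omega) (by positivity) (by nlinarith) (by rw [hqe, hae]; ring)
      -- unfold one iteration of each loop
      rw [bLoop, if_pos (by omega : p*10 ≤ 10*q + d)]
      conv_rhs => rw [bLoop, if_pos hpq]
      simp only [PySem.Int.floordiv_eq_ediv_of_pos (by positivity : (0:Int) < p*10*10),
        PySem.Int.floordiv_eq_ediv_of_pos (by positivity : (0:Int) < p*10),
        PySem.Int.floordiv_eq_ediv_of_pos (by omega : (0:Int) < p),
        PySem.Int.mod_eq_emod_of_pos (by positivity : (0:Int) < p*10),
        PySem.Int.mod_eq_emod_of_pos (by omega : (0:Int) < p),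
        PySem.Int.mod_eq_emod_of_pos (by norm_num : (0:Int) < 10)]
      rw [hd1.1, hd1.2, hd2.1, hd3.1]
      -- recursive calls related by the induction hypothesis at place 10p
      have ihr := ih q d (p*10) hq hd0 hd9 (by omega)
        (by rw [show p * 10 * 10 ^ f = p * 10 ^ (f+1) by ring]; exact hlt)
      rw [ihr, hd3.1]
      -- the count of zero digits of q at places ≥ p, unfolded once
      rw [csn_unfold a (by omega), ← ha2]
      by_cases hsz : a % 10 = 0
      · rw [if_pos hsz, if_pos hsz, if_pos hsz]; ring
      · rw [if_neg hsz, if_neg hsz, if_neg hsz]; ring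
    · -- both loops stop
      rw [bLoop_stop _ _ _ (by omega : (10*q + d) < p*10),
        bLoop_stop _ _ _ (by omega : q < p),
        Int.ediv_eq_zero_of_lt hq (by omega), csn_nonpos 0 le_rfl]
      ring

theorem bLoop_eq_SZ (f : Nat) : ∀ m : Int, 0 ≤ m → m < 10 ^ f →
    bLoop f m 1 = SZ (m.toNat + 1) := by
  induction f with
  | zero =>
    intro m hm hlt
    have : m = 0 := by simpa using hlt |> fun h => by omega
    subst this
    rw [show (0:Int).toNat + 1 = 1 by rfl, SZ_small 1 (by omega)]
    rfl
  | succ f ih =>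
    intro m hm hlt
    by_cases h1 : m < 1
    · have : m = 0 := by omega
      subst this
      rw [bLoop_stop _ _ _ (by omega), show (0:Int).toNat + 1 = 1 by rfl, SZ_small 1 (by omega)]
    · -- one loop iteration at place 1, then the shift recurrence
      have h10 : (10:Int)^(f+1) = 10^f * 10 := by ring
      have hq9 : m / 10 < 10 ^ f := by omega
      rw [bLoop, if_pos (by omega : (1:Int) ≤ m)]
      simp only [PySem.Int.floordiv_eq_ediv_of_pos (by norm_num : (0:Int) < 1*10),
        PySem.Int.floordiv_eq_ediv_of_pos (by norm_num : (0:Int) < 1),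
        PySem.Int.mod_eq_emod_of_pos (by norm_num : (0:Int) < 1),
        PySem.Int.mod_eq_emod_of_pos (by norm_num : (0:Int) < 10)]
      have hc : m / (1*10) = m / 10 := by norm_num
      have hc2 : m / 1 = m := Int.ediv_one m
      have hc3 : m % 1 = 0 := Int.emod_one m
      have hshift := bLoop_shift f (m / 10) (m % 10) 1 (by omega) (by omega) (by omega)
        le_rfl (by simpa using hq9)
      rw [show 10 * (m / 10) + m % 10 = m by omega] at hshift
      rw [hc, hc2, hc3, hshift, Int.ediv_one]
      have ihq := ih (m / 10) (by omega) hq9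
      rw [ihq]
      by_cases hq0 : m / 10 = 0
      · -- 1 ≤ m ≤ 9: everything below ten is zero
        rw [hq0, csn_nonpos 0 le_rfl, SZ_small ((0:Int).toNat + 1) (by norm_num),
          SZ_small (m.toNat + 1) (by omega)]
        by_cases hd : m % 10 = 0
        · rw [if_pos hd]; omega
        · rw [if_neg hd]; omega
      · -- m ≥ 10: the SZ recurrence at m = 10q + d
        have hsz := SZ_recB (m / 10).toNat (m % 10).toNat (by omega) (by omega)
        have hqc : (((m / 10).toNat : Nat) : Int) = m / 10 := by omega
        have hrc : (((m % 10).toNat : Nat) : Int) = m % 10 := by omega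
        rw [hqc, hrc] at hsz
        have hnt : m.toNat + 1 = 10 * (m / 10).toNat + (m % 10).toNat + 1 := by omega
        rw [hnt, hsz, show (m / 10).toNat + 1 = (m/10).toNat + 1 from rfl]
        by_cases hd : m % 10 = 0
        · rw [if_pos hd, hd]; push_cast; ring_nf
        · rw [if_neg hd]; ring_nf

theorem B_char (n : Int) (h : 1 ≤ n) : solve_1_n_alt n = SZ n.toNat + 1 := by
  rw [solve_1_n_alt, if_neg (by omega : ¬ n ≤ 0)]
  have hfuel : n - 1 < 10 ^ ((n-1).toNat + 1) := by
    have h1 : (n-1).toNat < 10 ^ (n-1).toNat := Nat.lt_pow_self (by norm_num)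
    have h2 : 10 ^ (n-1).toNat ≤ 10 ^ ((n-1).toNat + 1) := Nat.pow_le_pow_right (by norm_num) (by omega)
    have := lt_of_lt_of_le h1 h2
    have hcast : ((n-1).toNat : Int) < (10:Int) ^ ((n-1).toNat + 1) := by exact_mod_cast this
    omega
  rw [bLoop_eq_SZ _ (n-1) (by omega) hfuel, show (n-1).toNat + 1 = n.toNat by omega]
  ring

-- ===== VERDICT (by name: the statement is the Claim_ definition above) =====
theorem solve_1_n_spec : Claim_equal_solve_1_n := by
  intro n _ hPre
  unfold Spec_solve_1_n
  by_cases h : 1 ≤ n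
  · rw [A_char_aux n.toNat n h le_rfl, B_char n h]
  · have h0 : n = 0 := by unfold Pre_solve_1_n at hPre; omega
    subst h0
    rw [solve_1_n, if_pos rfl, solve_1_n_alt, if_pos (by norm_num)]
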